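-- pv_equiv track=rewrite | github.com/nannapanenir/coding-bat-solutions | Logic-2/no_teen_sum.py | no_teen_sum
-- ===== SOURCE A (Python) =====
-- def no_teen_sum(a, b, c):
--   sum=0
--   for a in [a,b,c]:
--     if a in range(13,20):
--       if a==15 or a==16:
--         sum+=  fix_teen(a)
--       else:
--         sum
--     else:
--       sum+=a
--   return sum
--
-- def fix_teen(num):
--
--   return num
-- ===== SOURCE B (Python) =====
-- BAD = (13, 14, 17, 18, 19)
--
-- def no_teen_sum(a, b, c):
--     # sum everything, then subtract the values that must not count
--     return a + b + c - sum(x for x in (a, b, c) if x in BAD)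
-- ===== Notes on version B (the rewrite author's own statement) =====
-- stated objective: alternative
-- what changed: Instead of A's loop that conditionally accumulates each value through nested range/15-16 branches, B adds all three values and then subtracts a correction: the sum of those arguments that lie in the explicit exclusion set {13,14,17,18,19}.
import Mathlib
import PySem

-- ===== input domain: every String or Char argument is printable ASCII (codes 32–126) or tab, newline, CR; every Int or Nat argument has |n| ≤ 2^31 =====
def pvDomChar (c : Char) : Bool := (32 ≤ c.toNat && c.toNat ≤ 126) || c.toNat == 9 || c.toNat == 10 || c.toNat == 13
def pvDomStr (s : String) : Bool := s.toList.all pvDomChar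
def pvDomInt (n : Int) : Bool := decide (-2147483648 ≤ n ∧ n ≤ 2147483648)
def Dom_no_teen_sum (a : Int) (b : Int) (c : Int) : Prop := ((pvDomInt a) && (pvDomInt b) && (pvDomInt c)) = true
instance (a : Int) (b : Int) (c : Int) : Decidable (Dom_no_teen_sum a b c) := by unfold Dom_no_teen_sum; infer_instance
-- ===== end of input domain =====

-- B adds all three arguments and subtracts the sum of those lying in the exclusion set {13,14,17,18,19} (alternative formulation).
-- ===== PORT A =====
-- helper fix_teen of A: returns its argument unchanged
def fixTeenA (num : Int) : Int := num

-- literal port: fold over [a,b,c]; `a in range(13,20)` on an Int is 13 ≤ a < 20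
def no_teen_sum (a : Int) (b : Int) (c : Int) : Int :=
  [a, b, c].foldl (fun sum a =>
    if 13 ≤ a ∧ a < 20 then
      if a = 15 ∨ a = 16 then sum + fixTeenA a
      else sum
    else sum + a) 0

-- ===== PORT B =====
-- BAD = (13, 14, 17, 18, 19); membership test `x in BAD`
def badB : List Int := [13, 14, 17, 18, 19]

def no_teen_sum_alt (a : Int) (b : Int) (c : Int) : Int :=
  a + b + c - (([a, b, c].filter (fun x => x ∈ badB)).foldl (· + ·) 0)

-- ===== PRECONDITION & SPEC =====
def Spec_no_teen_sum (a : Int) (b : Int) (c : Int) (out : Int) : Prop := out = no_teen_sum_alt a b c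
instance (a : Int) (b : Int) (c : Int) (out : Int) : Decidable (Spec_no_teen_sum a b c out) := by unfold Spec_no_teen_sum; infer_instance

-- ===== CLAIM =====
def Claim_equal_no_teen_sum : Prop := ∀ (a : Int) (b : Int) (c : Int), Dom_no_teen_sum a b c → Spec_no_teen_sum a b c (no_teen_sum a b c)

-- ===== LEMMAS AND PROOFS =====
def badPart (x : Int) : Int := if x ∈ badB then x else 0

theorem step_eq (s x : Int) :
    (if 13 ≤ x ∧ x < 20 then if x = 15 ∨ x = 16 then s + fixTeenA x else s else s + x)
    = s + x - badPart x := by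
  simp only [fixTeenA, badPart, badB, List.mem_cons, List.not_mem_nil, or_false]
  split_ifs <;> omega

theorem filt3 (a b c : Int) :
    (([a, b, c].filter (fun x => x ∈ badB)).foldl (· + ·) 0)
    = badPart a + badPart b + badPart c := by
  by_cases ha : a ∈ badB <;> by_cases hb : b ∈ badB <;> by_cases hc : c ∈ badB <;>
    simp [List.filter_cons, badPart, ha, hb, hc] <;> omega

-- ===== VERDICT =====
theorem no_teen_sum_spec : Claim_equal_no_teen_sum := by
  intro a b c _
  show _ = _
  simp only [no_teen_sum, no_teen_sum_alt, List.foldl, step_eq, filt3]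
  omega
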